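-- pv_equiv track=rewrite | github.com/MM-Speech/WavAlign | dataset/vita_audio_rl_sft_dataset.py | _extract_history_text
-- ===== SOURCE A (Python) =====
-- from typing import Any, Dict, List, Optional
--
-- def _extract_history_text(history: Optional[str]) -> str:
--     if not history:
--         return ""
--     history = history.strip()
--     if not history:
--         return ""
--     if "[USER]" not in history or "[ASSISTANT]" not in history:
--         return history
--
--     turns: List[str] = []
--     parts = history.split("[USER]")[1:]
--     for part in parts:
--         if "[ASSISTANT]" in part:
--             user_part, assistant_part = part.split("[ASSISTANT]", 1)
--             user_text = user_part.strip()
--             assistant_text = assistant_part.split("[USER]")[0].strip()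
--             if user_text:
--                 turns.append(f"User: {user_text}")
--             if assistant_text:
--                 turns.append(f"Assistant: {assistant_text}")
--         else:
--             user_text = part.strip()
--             if user_text:
--                 turns.append(f"User: {user_text}")
--     return "\n".join(turns)
-- ===== SOURCE B (Python) =====
-- def _extract_history_text(history):
--     # Single left-to-right state-machine scan instead of nested split passes.
--     if not history:
--         return ""
--     h = history.strip()
--     if not h:
--         return ""
--     if "[USER]" not in h or "[ASSISTANT]" not in h:
--         return h
--
--     turns = []
--     state = 0  # 0 = before first [USER], 1 = user text, 2 = assistant text
--     ubuf = []
--     abuf = []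
--
--     def flush():
--         u = "".join(ubuf).strip()
--         a = "".join(abuf).strip()
--         if u:
--             turns.append("User: " + u)
--         if a:
--             turns.append('Assistant: ' + a)
--
--     i = 0
--     n = len(h)
--     while i < n:
--         if h.startswith("[USER]", i):
--             if state:
--                 flush()
--             ubuf = []
--             abuf = []
--             state = 1
--             i += 6
--         elif h.startswith("[ASSISTANT]", i):
--             if state == 1:
--                 state = 2
--             elif state == 2:
--                 abuf.append("[ASSISTANT]")  # a repeated marker stays literal text
--             i += 11
--         else:
--             if state == 1:
--                 ubuf.append(h[i])
--             elif state == 2: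
--                 abuf.append(h[i])
--             i += 1
--     if state:
--         flush()
--     return "\n".join(turns)
-- ===== Notes on version B (the rewrite author's own statement) =====
-- stated objective: alternative
-- what changed: Replaced A's nested split passes (split on [USER], then per-part split on [ASSISTANT] and again on [USER]) with a single left-to-right state-machine scan that walks the string once, switching between preamble/user/assistant states and flushing buffered text at each [USER] marker.
import Mathlib
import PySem

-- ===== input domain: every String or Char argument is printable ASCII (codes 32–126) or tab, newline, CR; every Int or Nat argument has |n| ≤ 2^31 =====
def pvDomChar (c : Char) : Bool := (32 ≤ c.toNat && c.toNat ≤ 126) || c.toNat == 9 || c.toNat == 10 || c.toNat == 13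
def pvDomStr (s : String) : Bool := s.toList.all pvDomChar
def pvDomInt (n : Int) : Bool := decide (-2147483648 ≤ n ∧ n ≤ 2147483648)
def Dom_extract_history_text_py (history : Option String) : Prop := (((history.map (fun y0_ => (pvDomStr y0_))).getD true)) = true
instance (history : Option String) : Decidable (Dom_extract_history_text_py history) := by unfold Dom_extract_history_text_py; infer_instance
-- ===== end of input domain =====

-- B re-implements A's nested split passes as a single left-to-right state-machine scan (objective: alternative decomposition, same cost).

-- ===== PORT A =====
-- the two marker strings and the two output line prefixes, as char lists
def pvU : List Char := ['[', 'U', 'S', 'E', 'R', ']']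
def pvT : List Char := ['[', 'A', 'S', 'S', 'I', 'S', 'T', 'A', 'N', 'T', ']']
def pvUserPrefix : List Char := ['U', 's', 'e', 'r', ':', ' ']
def pvAsstPrefix : List Char := ['A', 's', 's', 'i', 's', 't', 'a', 'n', 't', ':', ' ']

-- body of A's for-loop (turns.append calls become list appends)
def pvAstep (turns : List (List Char)) (part : List Char) : List (List Char) :=
  if PySem.Chars.isIn pvT part then
    let ps := PySem.Chars.splitOnMax part pvT 1
    let user_part := ps.headD []
    let assistant_part := (ps.drop 1).headD []
    let user_text := PySem.Chars.strip user_part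
    let assistant_text := PySem.Chars.strip ((PySem.Chars.splitOn assistant_part pvU).headD [])
    let turns := if user_text ≠ [] then turns ++ [pvUserPrefix ++ user_text] else turns
    if assistant_text ≠ [] then turns ++ [pvAsstPrefix ++ assistant_text] else turns
  else
    let user_text := PySem.Chars.strip part
    if user_text ≠ [] then turns ++ [pvUserPrefix ++ user_text] else turns

def extract_history_text_py (history : Option String) : String :=
  match history with
  | none => ""
  | some h0 =>
    if h0.toList = [] then "" else
    let h := PySem.Chars.strip h0.toList
    if h = [] then "" else
    if !(PySem.Chars.isIn pvU h) || !(PySem.Chars.isIn pvT h) then String.ofList h else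
    let parts := (PySem.Chars.splitOn h pvU).tail
    let turns := parts.foldl pvAstep []
    String.ofList (PySem.Chars.join ['\n'] turns)

-- ===== PORT B =====
-- flush(): emit the accumulated user/assistant buffers as lines
def pvFlush (ub ab : List Char) : List (List Char) :=
  let u := PySem.Chars.strip ub
  let a := PySem.Chars.strip ab
  (if u ≠ [] then [pvUserPrefix ++ u] else []) ++ (if a ≠ [] then [pvAsstPrefix ++ a] else [])

-- the while-loop: one scan, state 0 = before first [USER], 1 = user text, 2 = assistant text
def pvScan (st : Nat) (l ub ab : List Char) (turns : List (List Char)) : List (List Char) :=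
  match l with
  | [] => if st = 0 then turns else turns ++ pvFlush ub ab
  | c :: rest =>
    if PySem.Chars.startswith (c :: rest) pvU then
      pvScan 1 ((c :: rest).drop 6) [] [] (if st = 0 then turns else turns ++ pvFlush ub ab)
    else if PySem.Chars.startswith (c :: rest) pvT then
      if st = 1 then pvScan 2 ((c :: rest).drop 11) ub ab turns
      else if st = 2 then pvScan 2 ((c :: rest).drop 11) ub (ab ++ pvT) turns
      else pvScan 0 ((c :: rest).drop 11) ub ab turns
    else pvScan st rest (if st = 1 then ub ++ [c] else ub) (if st = 2 then ab ++ [c] else ab) turns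
termination_by l.length
decreasing_by all_goals (simp; try omega)

def extract_history_text_py_alt (history : Option String) : String :=
  match history with
  | none => ""
  | some h0 =>
    if h0.toList = [] then "" else
    let h := PySem.Chars.strip h0.toList
    if h = [] then "" else
    if !(PySem.Chars.isIn pvU h) || !(PySem.Chars.isIn pvT h) then String.ofList h else
    String.ofList (PySem.Chars.join ['\n'] (pvScan 0 h [] [] []))

-- ===== PRECONDITION & SPEC =====
def Spec_extract_history_text_py (history : Option String) (out : String) : Prop := out = extract_history_text_py_alt history
instance (history : Option String) (out : String) : Decidable (Spec_extract_history_text_py history out) := by unfold Spec_extract_history_text_py; infer_instance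

-- ===== CLAIM (what is proved, stated in full; the proofs are below) =====
def Claim_equal_extract_history_text_py : Prop := ∀ (history : Option String), Dom_extract_history_text_py history → Spec_extract_history_text_py history (extract_history_text_py history)

-- ===== LEMMAS AND PROOFS =====

-- ---- characterizing PySem.Chars.splitOn / splitOnMax (fuel-based leftmost scans) ----
theorem pv_go_nil (sep : List Char) (fuel : Nat) (cur : List Char) (acc : List (List Char)) :
    PySem.Chars.splitOn.go sep fuel [] cur acc = (cur.reverse :: acc).reverse := by
  cases fuel <;> simp [PySem.Chars.splitOn.go]

theorem pv_go_step (sep : List Char) (fuel : Nat) (c : Char) (rest cur : List Char) (acc : List (List Char))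
    (h : sep.isPrefixOf (c :: rest) = false) :
    PySem.Chars.splitOn.go sep (fuel+1) (c :: rest) cur acc = PySem.Chars.splitOn.go sep fuel rest (c :: cur) acc := by
  simp [PySem.Chars.splitOn.go, h]

theorem pv_go_sep (sep : List Char) (fuel : Nat) (l cur : List Char) (acc : List (List Char))
    (h : sep.isPrefixOf l = true) (hl : l ≠ []) :
    PySem.Chars.splitOn.go sep (fuel+1) l cur acc = PySem.Chars.splitOn.go sep fuel (l.drop sep.length) [] (cur.reverse :: acc) := by
  cases l with
  | nil => simp at hl
  | cons c rest => simp [PySem.Chars.splitOn.go, h]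

theorem pv_go_text (sep : List Char) :
    ∀ (p t cur : List Char) (acc : List (List Char)) (fuel : Nat),
      (∀ j, j < p.length → sep.isPrefixOf ((p ++ t).drop j) = false) →
      PySem.Chars.splitOn.go sep (fuel + p.length) (p ++ t) cur acc
        = PySem.Chars.splitOn.go sep fuel t (p.reverse ++ cur) acc := by
  intro p
  induction p with
  | nil => intro t cur acc fuel _; simp
  | cons c p' ih =>
    intro t cur acc fuel h
    have h0 : sep.isPrefixOf (c :: (p' ++ t)) = false := by
      simpa using h 0 (by simp)
    have : fuel + (c :: p').length = (fuel + p'.length) + 1 := by simp; omega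
    rw [this]
    rw [show ((c :: p') ++ t) = c :: (p' ++ t) by simp]
    rw [pv_go_step sep _ c _ cur acc h0]
    rw [ih t (c :: cur) acc fuel ?_]
    · simp
    · intro j hj
      have := h (j+1) (by simp; omega)
      simpa using this

theorem pv_go_acc (sep : List Char) :
    ∀ (fuel : Nat) (l cur : List Char) (acc : List (List Char)),
      PySem.Chars.splitOn.go sep fuel l cur acc = acc.reverse ++ PySem.Chars.splitOn.go sep fuel l cur [] := by
  intro fuel
  induction fuel with
  | zero => intro l cur acc; simp [PySem.Chars.splitOn.go]
  | succ f ih =>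
    intro l cur acc
    cases l with
    | nil => simp [pv_go_nil]
    | cons c rest =>
      by_cases h : sep.isPrefixOf (c :: rest) = true
      · rw [pv_go_sep sep f _ cur acc h (by simp), pv_go_sep sep f _ cur [] h (by simp)]
        rw [ih _ [] (cur.reverse :: acc), ih _ [] [cur.reverse]]
        simp
      · rw [pv_go_step sep f c rest cur acc (eq_false_of_ne_true h), pv_go_step sep f c rest cur [] (eq_false_of_ne_true h)]
        exact ih rest (c :: cur) acc

theorem pv_go_fuel (sep : List Char) (hsep : sep ≠ []) :
    ∀ (fuel : Nat) (k : Nat) (l cur : List Char) (acc : List (List Char)), l.length < fuel →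
      PySem.Chars.splitOn.go sep (fuel + k) l cur acc = PySem.Chars.splitOn.go sep fuel l cur acc := by
  intro fuel
  induction fuel with
  | zero => intro k l cur acc h; omega
  | succ f ih =>
    intro k l cur acc h
    cases l with
    | nil => simp [pv_go_nil]
    | cons c rest =>
      by_cases hp : sep.isPrefixOf (c :: rest) = true
      · rw [show f + 1 + k = (f + k) + 1 by omega]
        rw [pv_go_sep sep (f+k) _ cur acc hp (by simp), pv_go_sep sep f _ cur acc hp (by simp)]
        apply ih
        have hsl : 0 < sep.length := List.length_pos_iff.mpr hsep
        simp at h ⊢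
        omega
      · rw [show f + 1 + k = (f + k) + 1 by omega]
        rw [pv_go_step sep (f+k) c rest cur acc (eq_false_of_ne_true hp), pv_go_step sep f c rest cur acc (eq_false_of_ne_true hp)]
        apply ih
        simp at h; omega

theorem pv_splitOn_no (sep s : List Char)
    (h : ∀ j, j < s.length → sep.isPrefixOf (s.drop j) = false) :
    PySem.Chars.splitOn s sep = [s] := by
  unfold PySem.Chars.splitOn
  rw [show (s : List Char) = s ++ [] from (List.append_nil s).symm]
  rw [show ((s ++ [] : List Char)).length + 1 = 1 + s.length by simp only [List.length_append, List.length_nil]; omega]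
  rw [pv_go_text sep s [] [] [] 1 (by simpa using h)]
  simp [pv_go_nil]

theorem pv_splitOn_first (sep p r : List Char) (hsep : sep ≠ [])
    (h : ∀ j, j < p.length → sep.isPrefixOf ((p ++ sep ++ r).drop j) = false) :
    PySem.Chars.splitOn (p ++ sep ++ r) sep = p :: PySem.Chars.splitOn r sep := by
  have hsl : 0 < sep.length := List.length_pos_iff.mpr hsep
  unfold PySem.Chars.splitOn
  rw [show (p ++ sep ++ r).length + 1 = (sep.length + r.length + 1) + p.length by
        simp only [List.length_append]; omega]
  rw [show (p ++ sep ++ r) = p ++ (sep ++ r) by simp]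
  rw [pv_go_text sep p (sep ++ r) [] [] _ (by simpa using h)]
  rw [show sep.length + r.length + 1 = (sep.length + r.length) + 1 from rfl]
  rw [pv_go_sep sep _ (sep ++ r) _ [] (by simp [List.isPrefixOf_iff_prefix]) (by simp [hsep])]
  rw [show List.drop sep.length (sep ++ r) = r by simp]
  rw [show sep.length + r.length = (r.length + 1) + (sep.length - 1) by omega]
  rw [pv_go_fuel sep hsep (r.length+1) (sep.length-1) _ _ _ (by omega)]
  rw [pv_go_acc sep (r.length+1) r [] _]
  simp

theorem pv_goM_zero (sep : List Char) (fuel : Nat) (l cur : List Char) (acc : List (List Char)) :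
    PySem.Chars.splitOnMax.go sep fuel 0 l cur acc = ((cur.reverse ++ l) :: acc).reverse := by
  cases fuel with
  | zero => simp [PySem.Chars.splitOnMax.go]
  | succ f => cases l <;> simp [PySem.Chars.splitOnMax.go]

theorem pv_goM_step (sep : List Char) (fuel m : Nat) (c : Char) (rest cur : List Char) (acc : List (List Char))
    (hm : m ≠ 0) (h : sep.isPrefixOf (c :: rest) = false) :
    PySem.Chars.splitOnMax.go sep (fuel+1) m (c :: rest) cur acc = PySem.Chars.splitOnMax.go sep fuel m rest (c :: cur) acc := by
  simp [PySem.Chars.splitOnMax.go, h, hm]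

theorem pv_goM_sep (sep : List Char) (fuel m : Nat) (l cur : List Char) (acc : List (List Char))
    (hm : m ≠ 0) (h : sep.isPrefixOf l = true) (hl : l ≠ []) :
    PySem.Chars.splitOnMax.go sep (fuel+1) m l cur acc = PySem.Chars.splitOnMax.go sep fuel (m-1) (l.drop sep.length) [] (cur.reverse :: acc) := by
  cases l with
  | nil => simp at hl
  | cons c rest => simp [PySem.Chars.splitOnMax.go, h, hm]

theorem pv_goM_text (sep : List Char) (m : Nat) (hm : m ≠ 0) :
    ∀ (p t cur : List Char) (acc : List (List Char)) (fuel : Nat),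
      (∀ j, j < p.length → sep.isPrefixOf ((p ++ t).drop j) = false) →
      PySem.Chars.splitOnMax.go sep (fuel + p.length) m (p ++ t) cur acc
        = PySem.Chars.splitOnMax.go sep fuel m t (p.reverse ++ cur) acc := by
  intro p
  induction p with
  | nil => intro t cur acc fuel _; simp
  | cons c p' ih =>
    intro t cur acc fuel h
    have h0 : sep.isPrefixOf (c :: (p' ++ t)) = false := by simpa using h 0 (by simp)
    rw [show fuel + (c :: p').length = (fuel + p'.length) + 1 by simp; omega]
    rw [show ((c :: p') ++ t) = c :: (p' ++ t) by simp]
    rw [pv_goM_step sep _ m c _ cur acc hm h0]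
    rw [ih t (c :: cur) acc fuel (fun j hj => by simpa using h (j+1) (by simp; omega))]
    simp

theorem pv_splitOnMax_first (sep u a : List Char) (hsep : sep ≠ [])
    (h : ∀ j, j < u.length → sep.isPrefixOf ((u ++ sep ++ a).drop j) = false) :
    PySem.Chars.splitOnMax (u ++ sep ++ a) sep 1 = [u, a] := by
  have h1 : ¬ ((1:Int) < 0) := by norm_num
  unfold PySem.Chars.splitOnMax
  rw [if_neg h1]
  have hlen : (u ++ sep ++ a).length + 1 = (sep.length + a.length + 1) + u.length := by simp; omega
  rw [show ((1:Int)).toNat = 1 from rfl, hlen]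
  rw [show (u ++ sep ++ a) = u ++ (sep ++ a) by simp]
  rw [pv_goM_text sep 1 (by omega) u (sep ++ a) [] [] _ (by simpa using h)]
  rw [show sep.length + a.length + 1 = (sep.length + a.length) + 1 from rfl]
  rw [pv_goM_sep sep _ 1 (sep ++ a) _ [] (by omega) (by simp [List.isPrefixOf_iff_prefix]) (by simp [hsep])]
  simp [pv_goM_zero]

-- ---- geometry of the two markers: '[' occurs only at index 0 ----
theorem pv_noSpan (M M' : List Char) (hM : M = pvU ∨ M = pvT) (hM' : M' = pvU ∨ M' = pvT)
    (a rest : List Char) (ha : 0 < a.length) (hlt : a.length < M.length)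
    (hrest : M'.isPrefixOf rest = true) (h : M.isPrefixOf (a ++ rest) = true) : False := by
  rw [List.isPrefixOf_iff_prefix] at hrest h
  have hr0 : rest[0]? = some '[' := by
    obtain ⟨t, ht⟩ := hrest
    rw [← ht]
    rcases hM' with rfl | rfl <;> simp [pvU, pvT]
  have hMa : M[a.length]? = some '[' := by
    obtain ⟨t, ht⟩ := h
    have h1 : (a ++ rest)[a.length]? = rest[0]? := by
      rw [List.getElem?_append_right (le_refl a.length)]
      simp
    have h2 : (M ++ t)[a.length]? = M[a.length]? := List.getElem?_append_left hlt
    rw [ht] at h2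
    rw [h1, hr0] at h2
    exact h2.symm
  have hchar : ∀ k, 0 < k → (k < pvU.length → pvU[k]? ≠ some '[') ∧ (k < pvT.length → pvT[k]? ≠ some '[') := by
    intro k hk
    constructor <;> intro hklt
    · have h6 : k < 6 := by simpa [pvU] using hklt
      interval_cases k <;> simp [pvU]
    · have h11 : k < 11 := by simpa [pvT] using hklt
      interval_cases k <;> simp [pvT]
  rcases hM with rfl | rfl
  · exact ((hchar a.length ha).1 hlt) hMa
  · exact ((hchar a.length ha).2 hlt) hMa

theorem pv_prefix_long (M a rest : List Char) (h : M.isPrefixOf (a ++ rest) = true)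
    (hle : M.length ≤ a.length) : M.isPrefixOf a = true := by
  rw [List.isPrefixOf_iff_prefix] at *
  exact (List.isPrefix_append_of_length hle).mp h

theorem pv_no_head (M : List Char) (hM : M = pvU ∨ M = pvT)
    (a rest : List Char) (ha : a ≠ []) (hinf : PySem.Chars.isIn M a = false)
    (hrest : rest = [] ∨ pvU.isPrefixOf rest = true ∨ pvT.isPrefixOf rest = true) :
    M.isPrefixOf (a ++ rest) = false := by
  by_contra hcon
  have h : M.isPrefixOf (a ++ rest) = true := by
    cases hx : M.isPrefixOf (a ++ rest) <;> simp_all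
  have hnin : ¬ M <:+: a := by rw [← PySem.Chars.isIn_eq_false_iff]; exact hinf
  have hpos : 0 < a.length := List.length_pos_iff.mpr ha
  have hinfix : M.length ≤ a.length → False := by
    intro hle
    have hp := pv_prefix_long M a rest h hle
    rw [List.isPrefixOf_iff_prefix] at hp
    exact hnin hp.isInfix
  rcases hrest with rfl | hrest | hrest
  · rw [List.append_nil] at h
    rw [List.isPrefixOf_iff_prefix] at h
    exact hnin h.isInfix
  · by_cases hle : M.length ≤ a.length
    · exact hinfix hle
    · exact pv_noSpan M pvU hM (Or.inl rfl) a rest hpos (by omega) hrest h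
  · by_cases hle : M.length ≤ a.length
    · exact hinfix hle
    · exact pv_noSpan M pvT hM (Or.inr rfl) a rest hpos (by omega) hrest h

-- ---- occurrence bookkeeping ----
theorem pv_isIn_cons (M : List Char) (c : Char) (a : List Char)
    (h : PySem.Chars.isIn M (c :: a) = false) : PySem.Chars.isIn M a = false := by
  rw [PySem.Chars.isIn_eq_false_iff] at h ⊢
  intro hx
  exact h (hx.trans (List.suffix_cons c a).isInfix)

theorem pv_isIn_drop (M : List Char) (a : List Char) (k : Nat)
    (h : PySem.Chars.isIn M a = false) : PySem.Chars.isIn M (a.drop k) = false := by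
  rw [PySem.Chars.isIn_eq_false_iff] at h ⊢
  intro hx
  exact h (hx.trans (List.drop_suffix k a).isInfix)

theorem pv_isIn_infix (M x y : List Char) (hxy : x <:+: y)
    (h : PySem.Chars.isIn M y = false) : PySem.Chars.isIn M x = false := by
  rw [PySem.Chars.isIn_eq_false_iff] at h ⊢
  intro hc
  exact h (hc.trans hxy)

theorem pv_first_occ (M s : List Char) (hin : PySem.Chars.isIn M s = true) :
    ∃ p r, s = p ++ M ++ r ∧ (∀ j, j < p.length → M.isPrefixOf (s.drop j) = false) := by
  have hinf : M <:+: s := (PySem.Chars.isIn_iff_infix M s).mp hin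
  have hf : 0 ≤ PySem.Chars.find s M := (PySem.Chars.find_nonneg_iff s M).mpr hinf
  obtain ⟨hpre, hmin⟩ := PySem.Chars.find_spec hf
  have hil : (PySem.Chars.find s M).toNat ≤ s.length := by
    have := PySem.Chars.find_le_length s M
    omega
  refine ⟨s.take (PySem.Chars.find s M).toNat,
          (s.drop (PySem.Chars.find s M).toNat).drop M.length, ?_, ?_⟩
  · obtain ⟨t, ht⟩ := hpre
    have htt : t = (s.drop (PySem.Chars.find s M).toNat).drop M.length := by
      rw [← ht]; simp
    rw [← htt, List.append_assoc, ht, List.take_append_drop]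
  · intro j hj
    have hjlt : j < (PySem.Chars.find s M).toNat := by
      simp [List.length_take] at hj
      omega
    have := hmin j hjlt
    cases hx : M.isPrefixOf (List.drop j s)
    · rfl
    · exfalso
      rw [List.isPrefixOf_iff_prefix] at hx
      exact this hx

theorem pv_isIn_of_min (M p t : List Char) (hM : M ≠ [])
    (h : ∀ j, j < p.length → M.isPrefixOf ((p ++ t).drop j) = false) :
    PySem.Chars.isIn M p = false := by
  cases hx : PySem.Chars.isIn M p
  · rfl
  · exfalso
    obtain ⟨x, y, hxy⟩ := (PySem.Chars.isIn_iff_infix M p).mp hx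
    have hxl : x.length < p.length := by
      have hlp : p.length = x.length + M.length + y.length := by rw [← hxy]; simp; omega
      have : 0 < M.length := List.length_pos_iff.mpr hM
      omega
    have hpre : M.isPrefixOf ((p ++ t).drop x.length) = true := by
      rw [List.isPrefixOf_iff_prefix]
      rw [show p ++ t = x ++ (M ++ (y ++ t)) by rw [← hxy]; simp]
      rw [List.drop_append_of_le_length (by omega), List.drop_length]
      simp
    rw [h x.length hxl] at hpre
    simp at hpre

theorem pv_no_all (M s : List Char) (h : PySem.Chars.isIn M s = false) :
    ∀ j, M.isPrefixOf (s.drop j) = false := by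
  intro j
  cases hx : M.isPrefixOf (s.drop j)
  · rfl
  · exfalso
    rw [List.isPrefixOf_iff_prefix] at hx
    rw [PySem.Chars.isIn_eq_false_iff] at h
    exact h (hx.isInfix.trans (List.drop_suffix j s).isInfix)

-- ---- one-step unfoldings of pvScan ----
theorem pvScan_nil (st : Nat) (ub ab : List Char) (turns : List (List Char)) :
    pvScan st [] ub ab turns = if st = 0 then turns else turns ++ pvFlush ub ab := by
  rw [pvScan]

theorem pvScan_U (st : Nat) (c : Char) (rest ub ab : List Char) (turns : List (List Char))
    (h : pvU.isPrefixOf (c :: rest) = true) :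
    pvScan st (c :: rest) ub ab turns
      = pvScan 1 ((c :: rest).drop 6) [] [] (if st = 0 then turns else turns ++ pvFlush ub ab) := by
  rw [pvScan]; simp [PySem.Chars.startswith, h]

theorem pvScan_T (st : Nat) (c : Char) (rest ub ab : List Char) (turns : List (List Char))
    (hU : pvU.isPrefixOf (c :: rest) = false) (hT : pvT.isPrefixOf (c :: rest) = true) :
    pvScan st (c :: rest) ub ab turns
      = if st = 1 then pvScan 2 ((c :: rest).drop 11) ub ab turns
        else if st = 2 then pvScan 2 ((c :: rest).drop 11) ub (ab ++ pvT) turns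
        else pvScan 0 ((c :: rest).drop 11) ub ab turns := by
  rw [pvScan]; simp [PySem.Chars.startswith, hU, hT]

theorem pvScan_C (st : Nat) (c : Char) (rest ub ab : List Char) (turns : List (List Char))
    (hU : pvU.isPrefixOf (c :: rest) = false) (hT : pvT.isPrefixOf (c :: rest) = false) :
    pvScan st (c :: rest) ub ab turns
      = pvScan st rest (if st = 1 then ub ++ [c] else ub) (if st = 2 then ab ++ [c] else ab) turns := by
  rw [pvScan]; simp [PySem.Chars.startswith, hU, hT]

-- ---- scanning a marker-free chunk in each state ----
theorem pv_scan_text1 (a : List Char) :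
    ∀ (rest ub ab : List Char) (turns : List (List Char)),
      PySem.Chars.isIn pvU a = false → PySem.Chars.isIn pvT a = false →
      (rest = [] ∨ pvU.isPrefixOf rest = true ∨ pvT.isPrefixOf rest = true) →
      pvScan 1 (a ++ rest) ub ab turns = pvScan 1 rest (ub ++ a) ab turns := by
  induction a with
  | nil => intro rest ub ab turns _ _ _; simp
  | cons c a' ih =>
    intro rest ub ab turns hU hT hrest
    have h1 : pvU.isPrefixOf (c :: (a' ++ rest)) = false := by
      simpa using pv_no_head pvU (Or.inl rfl) (c :: a') rest (by simp) hU hrest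
    have h2 : pvT.isPrefixOf (c :: (a' ++ rest)) = false := by
      simpa using pv_no_head pvT (Or.inr rfl) (c :: a') rest (by simp) hT hrest
    rw [show (c :: a') ++ rest = c :: (a' ++ rest) by simp]
    rw [pvScan_C 1 c _ ub ab turns h1 h2]
    simp only [show ((1:Nat) = 1) = True by simp, show ((1:Nat) = 2) = False by simp, if_true, if_false]
    rw [ih rest (ub ++ [c]) ab turns (pv_isIn_cons _ c _ hU) (pv_isIn_cons _ c _ hT) hrest]
    simp

theorem pv_scan_text2 :
    ∀ (n : Nat) (a rest ub ab : List Char) (turns : List (List Char)), a.length ≤ n →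
      PySem.Chars.isIn pvU a = false →
      (rest = [] ∨ pvU.isPrefixOf rest = true) →
      pvScan 2 (a ++ rest) ub ab turns = pvScan 2 rest ub (ab ++ a) turns := by
  intro n
  induction n with
  | zero =>
    intro a rest ub ab turns hn _ _
    have : a = [] := List.length_eq_zero_iff.mp (by omega)
    subst this; simp
  | succ m ih =>
    intro a rest ub ab turns hn hU hrest
    cases a with
    | nil => simp
    | cons c a' =>
      have hrest' : rest = [] ∨ pvU.isPrefixOf rest = true ∨ pvT.isPrefixOf rest = true := by tauto
      have h1 : pvU.isPrefixOf (c :: (a' ++ rest)) = false := by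
        simpa using pv_no_head pvU (Or.inl rfl) (c :: a') rest (by simp) hU hrest'
      rw [show (c :: a') ++ rest = c :: (a' ++ rest) by simp]
      by_cases h2 : pvT.isPrefixOf (c :: (a' ++ rest)) = true
      · have hle : pvT.length ≤ (c :: a').length := by
          by_contra hlt
          rcases hrest with rfl | hrestU
          · rw [List.isPrefixOf_iff_prefix] at h2
            have hh := h2.length_le
            simp [pvT] at hh hlt
            omega
          · exact pv_noSpan pvT pvU (Or.inr rfl) (Or.inl rfl) (c :: a') rest (by simp)
              (by omega) hrestU (by simpa using h2)
        have hTa : pvT <+: (c :: a') := by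
          have := pv_prefix_long pvT (c :: a') rest (by simpa using h2) hle
          rwa [List.isPrefixOf_iff_prefix] at this
        obtain ⟨a2, ha2⟩ := hTa
        have hdrop : (c :: (a' ++ rest)).drop 11 = a2 ++ rest := by
          rw [show c :: (a' ++ rest) = (c :: a') ++ rest by simp, ← ha2]
          simp [pvT]
        rw [pvScan_T 2 c _ ub ab turns h1 h2]
        simp only [show ((2:Nat) = 1) = False by simp, show ((2:Nat) = 2) = True by simp, if_true, if_false]
        rw [hdrop]
        have hU2 : PySem.Chars.isIn pvU a2 = false := by
          have ha2' : a2 = (c :: a').drop 11 := by rw [← ha2]; simp [pvT]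
          rw [ha2']; exact pv_isIn_drop pvU _ 11 hU
        have hlen : a2.length ≤ m := by
          have hl : (c :: a').length = pvT.length + a2.length := by rw [← ha2]; simp
          simp [pvT] at hl
          simp at hn
          omega
        rw [ih a2 rest ub (ab ++ pvT) turns hlen hU2 hrest]
        rw [← ha2]
        simp
      · have h2' : pvT.isPrefixOf (c :: (a' ++ rest)) = false := eq_false_of_ne_true h2
        rw [pvScan_C 2 c _ ub ab turns h1 h2']
        simp only [show ((2:Nat) = 1) = False by simp, show ((2:Nat) = 2) = True by simp, if_true, if_false]
        rw [ih a' rest ub (ab ++ [c]) turns (by simp at hn; omega) (pv_isIn_cons _ c _ hU) hrest]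
        simp

theorem pv_scan_text0 :
    ∀ (n : Nat) (a rest ub ab : List Char) (turns : List (List Char)), a.length ≤ n →
      PySem.Chars.isIn pvU a = false →
      (rest = [] ∨ pvU.isPrefixOf rest = true) →
      pvScan 0 (a ++ rest) ub ab turns = pvScan 0 rest ub ab turns := by
  intro n
  induction n with
  | zero =>
    intro a rest ub ab turns hn _ _
    have : a = [] := List.length_eq_zero_iff.mp (by omega)
    subst this; simp
  | succ m ih =>
    intro a rest ub ab turns hn hU hrest
    cases a with
    | nil => simp
    | cons c a' =>
      have hrest' : rest = [] ∨ pvU.isPrefixOf rest = true ∨ pvT.isPrefixOf rest = true := by tauto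
      have h1 : pvU.isPrefixOf (c :: (a' ++ rest)) = false := by
        simpa using pv_no_head pvU (Or.inl rfl) (c :: a') rest (by simp) hU hrest'
      rw [show (c :: a') ++ rest = c :: (a' ++ rest) by simp]
      by_cases h2 : pvT.isPrefixOf (c :: (a' ++ rest)) = true
      · have hle : pvT.length ≤ (c :: a').length := by
          by_contra hlt
          rcases hrest with rfl | hrestU
          · rw [List.isPrefixOf_iff_prefix] at h2
            have hh := h2.length_le
            simp [pvT] at hh hlt
            omega
          · exact pv_noSpan pvT pvU (Or.inr rfl) (Or.inl rfl) (c :: a') rest (by simp)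
              (by omega) hrestU (by simpa using h2)
        have hTa : pvT <+: (c :: a') := by
          have := pv_prefix_long pvT (c :: a') rest (by simpa using h2) hle
          rwa [List.isPrefixOf_iff_prefix] at this
        obtain ⟨a2, ha2⟩ := hTa
        have hdrop : (c :: (a' ++ rest)).drop 11 = a2 ++ rest := by
          rw [show c :: (a' ++ rest) = (c :: a') ++ rest by simp, ← ha2]
          simp [pvT]
        rw [pvScan_T 0 c _ ub ab turns h1 h2]
        simp only [show ((0:Nat) = 1) = False by simp, show ((0:Nat) = 2) = False by simp, if_false]
        rw [hdrop]
        have hU2 : PySem.Chars.isIn pvU a2 = false := by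
          have ha2' : a2 = (c :: a').drop 11 := by rw [← ha2]; simp [pvT]
          rw [ha2']; exact pv_isIn_drop pvU _ 11 hU
        have hlen : a2.length ≤ m := by
          have hl : (c :: a').length = pvT.length + a2.length := by rw [← ha2]; simp
          simp [pvT] at hl
          simp at hn
          omega
        exact ih a2 rest ub ab turns hlen hU2 hrest
      · have h2' : pvT.isPrefixOf (c :: (a' ++ rest)) = false := eq_false_of_ne_true h2
        rw [pvScan_C 0 c _ ub ab turns h1 h2']
        simp only [show ((0:Nat) = 1) = False by simp, show ((0:Nat) = 2) = False by simp, if_false]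
        exact ih a' rest ub ab turns (by simp at hn; omega) (pv_isIn_cons _ c _ hU) hrest

-- ---- consuming a marker ----
theorem pv_scan_Useg (st : Nat) (r ub ab : List Char) (turns : List (List Char)) :
    pvScan st (pvU ++ r) ub ab turns
      = pvScan 1 r [] [] (if st = 0 then turns else turns ++ pvFlush ub ab) := by
  rw [show pvU ++ r = '[' :: (['U','S','E','R',']'] ++ r) by simp [pvU]]
  rw [pvScan_U st '[' _ ub ab turns (by simp [pvU, List.isPrefixOf_iff_prefix])]
  simp

theorem pv_scan_Tseg1 (r ub ab : List Char) (turns : List (List Char)) :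
    pvScan 1 (pvT ++ r) ub ab turns = pvScan 2 r ub ab turns := by
  have hU : pvU.isPrefixOf (pvT ++ r) = false := by
    cases h : pvU.isPrefixOf (pvT ++ r)
    · rfl
    · exfalso
      have := pv_prefix_long pvU pvT r h (by simp [pvU, pvT])
      simp [pvU, pvT, List.isPrefixOf] at this
  rw [show pvT ++ r = '[' :: (['A','S','S','I','S','T','A','N','T',']'] ++ r) by simp [pvT]]
  rw [pvScan_T 1 '[' _ ub ab turns (by simpa [pvT] using hU) (by simp [pvT, List.isPrefixOf_iff_prefix])]
  simp [pvT]

-- ---- A's loop body on a decomposed segment ----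
theorem pv_Astep_T (u a : List Char) (turns : List (List Char))
    (hmin : ∀ j, j < u.length → pvT.isPrefixOf ((u ++ pvT ++ a).drop j) = false)
    (haU : PySem.Chars.isIn pvU a = false) :
    pvAstep turns (u ++ pvT ++ a) = turns ++ pvFlush u a := by
  have hT : PySem.Chars.isIn pvT (u ++ pvT ++ a) = true := by
    rw [PySem.Chars.isIn_iff_infix]; exact ⟨u, a, rfl⟩
  unfold pvAstep
  rw [if_pos hT, pv_splitOnMax_first pvT u a (by simp [pvT]) hmin]
  simp only [List.headD, List.drop]
  rw [pv_splitOn_no pvU a (fun j _ => pv_no_all pvU a haU j)]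
  simp only [List.headD]
  unfold pvFlush
  split_ifs <;> simp_all

theorem pv_Astep_noT (p : List Char) (turns : List (List Char))
    (hT : PySem.Chars.isIn pvT p = false) :
    pvAstep turns p = turns ++ pvFlush p [] := by
  have hs : PySem.Chars.strip ([] : List Char) = [] := by decide
  unfold pvAstep pvFlush
  rw [if_neg (by simp [hT])]
  by_cases hp : PySem.Chars.strip p = [] <;> simp [hp, hs]

-- ---- the main loop correspondence ----
theorem pv_main_noU (s : List Char) (turns : List (List Char))
    (hU : PySem.Chars.isIn pvU s = false) :
    pvScan 1 s [] [] turns = (PySem.Chars.splitOn s pvU).foldl pvAstep turns := by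
  rw [pv_splitOn_no pvU s (fun j _ => pv_no_all pvU s hU j)]
  simp only [List.foldl]
  by_cases hT : PySem.Chars.isIn pvT s = true
  · obtain ⟨u, a, hdec, hmin⟩ := pv_first_occ pvT s hT
    rw [hdec] at hmin ⊢
    have hU' : PySem.Chars.isIn pvU (u ++ pvT ++ a) = false := hdec ▸ hU
    have huU : PySem.Chars.isIn pvU u = false :=
      pv_isIn_infix pvU u _ ⟨[], pvT ++ a, by simp⟩ hU'
    have huT : PySem.Chars.isIn pvT u = false :=
      pv_isIn_of_min pvT u (pvT ++ a) (by simp [pvT]) (by intro j hj; have := hmin j (by simpa using hj); simpa using this)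
    have haU : PySem.Chars.isIn pvU a = false :=
      pv_isIn_infix pvU a _ ⟨u ++ pvT, [], by simp⟩ hU'
    rw [pv_Astep_T u a turns hmin haU]
    rw [show u ++ pvT ++ a = u ++ (pvT ++ a) by simp]
    rw [pv_scan_text1 u (pvT ++ a) [] [] turns huU huT
        (Or.inr (Or.inr (by rw [List.isPrefixOf_iff_prefix]; exact List.prefix_append pvT a)))]
    rw [List.nil_append]
    rw [pv_scan_Tseg1 a u [] turns]
    have := pv_scan_text2 a.length a [] u [] turns le_rfl haU (Or.inl rfl)
    rw [List.append_nil] at this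
    rw [this, pvScan_nil]
    simp
  · have hT' := eq_false_of_ne_true hT
    have h1 := pv_scan_text1 s [] [] [] turns hU hT' (Or.inl rfl)
    rw [List.append_nil] at h1
    rw [h1, pvScan_nil, pv_Astep_noT s turns hT']
    simp

theorem pv_main :
    ∀ (n : Nat) (s : List Char) (turns : List (List Char)), s.length ≤ n →
      pvScan 1 s [] [] turns = (PySem.Chars.splitOn s pvU).foldl pvAstep turns := by
  intro n
  induction n with
  | zero =>
    intro s turns hn
    have : s = [] := List.length_eq_zero_iff.mp (by omega)
    subst this
    exact pv_main_noU [] turns (by decide)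
  | succ m ih =>
    intro s turns hn
    by_cases hU : PySem.Chars.isIn pvU s = true
    · obtain ⟨p, r, hdec, hmin⟩ := pv_first_occ pvU s hU
      rw [hdec] at hmin ⊢
      have hpU : PySem.Chars.isIn pvU p = false :=
        pv_isIn_of_min pvU p (pvU ++ r) (by simp [pvU]) (by intro j hj; have := hmin j (by simpa using hj); simpa using this)
      have hrlen : r.length ≤ m := by
        have := congrArg List.length hdec
        simp [pvU] at this hn
        omega
      rw [pv_splitOn_first pvU p r (by simp [pvU]) hmin]
      rw [List.foldl_cons]
      by_cases hpT : PySem.Chars.isIn pvT p = true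
      · obtain ⟨u, a, hd2, hmin2⟩ := pv_first_occ pvT p hpT
        rw [hd2] at hmin2
        have hpU' : PySem.Chars.isIn pvU (u ++ pvT ++ a) = false := hd2 ▸ hpU
        have huU : PySem.Chars.isIn pvU u = false :=
          pv_isIn_infix pvU u _ ⟨[], pvT ++ a, by simp⟩ hpU'
        have huT : PySem.Chars.isIn pvT u = false :=
          pv_isIn_of_min pvT u (pvT ++ a) (by simp [pvT]) (by intro j hj; have := hmin2 j (by simpa using hj); simpa using this)
        have haU : PySem.Chars.isIn pvU a = false :=
          pv_isIn_infix pvU a _ ⟨u ++ pvT, [], by simp⟩ hpU'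
        rw [hd2]
        rw [show u ++ pvT ++ a ++ pvU ++ r = u ++ (pvT ++ (a ++ (pvU ++ r))) by simp]
        rw [pv_scan_text1 u _ [] [] turns huU huT
            (Or.inr (Or.inr (by rw [List.isPrefixOf_iff_prefix]; exact List.prefix_append pvT _)))]
        rw [List.nil_append]
        rw [pv_scan_Tseg1 _ u [] turns]
        rw [pv_scan_text2 a.length a (pvU ++ r) u [] turns le_rfl haU
            (Or.inr (by rw [List.isPrefixOf_iff_prefix]; exact List.prefix_append pvU r))]
        rw [List.nil_append]
        rw [pv_scan_Useg 2 r u a turns]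
        simp only [show ((2:Nat) = 0) = False by simp, if_false]
        rw [ih r _ hrlen]
        rw [pv_Astep_T u a turns hmin2 haU]
      · have hpT' := eq_false_of_ne_true hpT
        rw [show p ++ pvU ++ r = p ++ (pvU ++ r) by simp]
        rw [pv_scan_text1 p (pvU ++ r) [] [] turns hpU hpT'
            (Or.inr (Or.inl (by rw [List.isPrefixOf_iff_prefix]; exact List.prefix_append pvU r)))]
        rw [List.nil_append]
        rw [pv_scan_Useg 1 r p [] turns]
        simp only [show ((1:Nat) = 0) = False by simp, if_false]
        rw [ih r _ hrlen]
        rw [pv_Astep_noT p turns hpT']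
    · exact pv_main_noU s turns (eq_false_of_ne_true hU)

-- ===== VERDICT (by name: the statement is the Claim_ definition above) =====
theorem extract_history_text_py_spec : Claim_equal_extract_history_text_py := by
  unfold Claim_equal_extract_history_text_py
  intro history _
  unfold Spec_extract_history_text_py
  cases history with
  | none => rfl
  | some h0 =>
    show extract_history_text_py (some h0) = extract_history_text_py_alt (some h0)
    simp only [extract_history_text_py, extract_history_text_py_alt]
    by_cases hnil : h0.toList = []
    · simp [hnil]
    · rw [if_neg hnil, if_neg hnil]
      by_cases h2 : PySem.Chars.strip h0.toList = []
      · simp [h2]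
      · by_cases h3 : (!(PySem.Chars.isIn pvU (PySem.Chars.strip h0.toList)) || !(PySem.Chars.isIn pvT (PySem.Chars.strip h0.toList))) = true
        · simp [h2, h3]
        · have h3' : (!(PySem.Chars.isIn pvU (PySem.Chars.strip h0.toList)) || !(PySem.Chars.isIn pvT (PySem.Chars.strip h0.toList))) = false := eq_false_of_ne_true h3
          have hU : PySem.Chars.isIn pvU (PySem.Chars.strip h0.toList) = true := by
            simp at h3'; exact h3'.1
          simp only [h2, h3', Bool.false_eq_true, if_false]
          obtain ⟨p, r, hdec, hmin⟩ := pv_first_occ pvU (PySem.Chars.strip h0.toList) hU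
          rw [hdec] at hmin
          have hpU : PySem.Chars.isIn pvU p = false :=
            pv_isIn_of_min pvU p (pvU ++ r) (by simp [pvU]) (by intro j hj; have := hmin j (by simpa using hj); simpa using this)
          rw [hdec]
          rw [pv_splitOn_first pvU p r (by simp [pvU]) hmin]
          rw [List.tail_cons]
          rw [show p ++ pvU ++ r = p ++ (pvU ++ r) by simp]
          rw [pv_scan_text0 p.length p (pvU ++ r) [] [] [] le_rfl hpU
              (Or.inr (by rw [List.isPrefixOf_iff_prefix]; exact List.prefix_append pvU r))]
          rw [pv_scan_Useg 0 r [] [] []]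
          simp only [show ((0:Nat) = 0) = True by simp, if_true]
          rw [pv_main r.length r [] le_rfl]
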